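-- pv_equiv track=rewrite | github.com/etiedem/adventofcode | 2017/python/day06/day06.py | part1
-- ===== SOURCE A (Python) =====
-- def get_cycle_size(seen: list, target: list):
--     l_seen = seen[:]
--     l_seen.reverse()
--     for idx, cur in enumerate(l_seen, 1):
--         if cur == target:
--             return idx
--     return -1
--
-- def part1(blocks: list):
--     count = 0
--     seen = [blocks[:]]
--     length = len(blocks)
--     while True:
--         high = max(blocks)
--         redis_idx = blocks.index(high)
--         cur_num = blocks[redis_idx]
--         redis_num = 1 if cur_num <= (length - 1) else (cur_num // (length - 1))
--         redis_total = redis_num * (length - 1) if redis_num > 1 else cur_num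
--         blocks[redis_idx] -= redis_total
--         for idx, _ in enumerate(range(0, redis_total, redis_num), 1):
--             blocks[(redis_idx + idx) % length] += redis_num
--         count += 1
--         if any(blocks == x for x in seen):
--             return count, get_cycle_size(seen, blocks)
--         seen.append(blocks[:])
-- ===== SOURCE B (Python) =====
-- # Floyd's tortoise-and-hare cycle detection: O(1) extra memory instead of the
-- # growing `seen` list with its per-iteration membership scans.  Mutates `blocks`
-- # in place to the first repeated configuration, like the original.
-- def part1(blocks: list):
--     length = len(blocks)
--
--     def step(state):
--         state = state.copy()
--         high = max(state)
--         i = state.index(high)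
--         num = 1 if high <= length - 1 else high // (length - 1)
--         total = num * (length - 1) if num > 1 else high
--         state[i] = high - total
--         chunks = len(range(0, total, num))
--         for off in range(1, chunks + 1):
--             state[(i + off) % length] += num
--         return state
--
--     # phase 1: find a meeting point inside the cycle
--     tortoise = step(blocks)
--     hare = step(step(blocks))
--     while tortoise != hare:
--         tortoise = step(tortoise)
--         hare = step(step(hare))
--     # phase 2: find mu, the number of steps before the cycle is entered
--     mu = 0
--     tortoise = list(blocks)
--     while tortoise != hare:
--         tortoise = step(tortoise)
--         hare = step(hare)
--         mu += 1
--     # phase 3: find lam, the cycle length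
--     lam = 1
--     hare = step(tortoise)
--     while tortoise != hare:
--         hare = step(hare)
--         lam += 1
--     blocks[:] = tortoise
--     return mu + lam, lam
-- ===== Notes on version B (the rewrite author's own statement) =====
-- stated objective: alternative
-- what changed: B detects the repeated configuration with Floyd's tortoise-and-hare cycle detection (two configurations of state, three short phases yielding the cycle entry mu and cycle length lam, returning (mu+lam, lam)) instead of A's growing seen-list with a linear membership scan every iteration and a reverse scan to recover the cycle length; Pre_ excludes only the inputs on which A raises (empty list: ValueError from max([]); singleton with a positive entry: ZeroDivisionError), where B raises identically.
-- outside the precondition, e.g. on part1([]): A raises ValueError, B raises ValueError; on part1([3]): A raises ZeroDivisionError, B raises ZeroDivisionError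
import Mathlib
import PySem

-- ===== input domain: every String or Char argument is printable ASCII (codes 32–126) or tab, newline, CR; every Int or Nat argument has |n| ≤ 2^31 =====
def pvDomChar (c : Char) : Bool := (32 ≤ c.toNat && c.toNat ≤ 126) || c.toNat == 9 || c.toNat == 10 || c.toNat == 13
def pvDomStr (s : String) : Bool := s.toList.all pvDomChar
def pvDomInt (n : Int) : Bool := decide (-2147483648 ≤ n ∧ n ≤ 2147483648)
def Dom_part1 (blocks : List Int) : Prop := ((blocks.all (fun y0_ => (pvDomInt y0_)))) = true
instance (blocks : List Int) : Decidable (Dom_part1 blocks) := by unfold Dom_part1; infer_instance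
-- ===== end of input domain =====

-- B replaces A's growing `seen` list (a linear membership scan every iteration plus a
-- reverse scan at the end) by Floyd's tortoise-and-hare cycle detection, which stores
-- only two configurations.  Both Pythons mutate the argument to the first repeated
-- configuration; the equivalence proved here is about the RETURN value.
-- The `pvFuel` bound only makes the while-True loops total in Lean (it provably
-- dominates the number of iterations of every loop); it is no algorithm switch.
def pvFuel (blocks : List Int) : Nat :=
  (2 * (blocks.map Int.natAbs).sum + 1) ^ blocks.length + 1

-- ===== PORT A =====
-- get_cycle_size: reverse seen, scan with a 1-based counter
def pvCycleGo (target : List Int) : List (List Int) → Int → Int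
  | [], _ => -1
  | cur :: rest, idx => if cur == target then idx else pvCycleGo target rest (idx + 1)

def get_cycle_size (seen : List (List Int)) (target : List Int) : Int :=
  pvCycleGo target seen.reverse 1

-- the redistribution statements of A's while-body, in A's order
def pvRedis (length : Int) (blocks : List Int) : List Int :=
  match PySem.List.max? blocks (fun x => x) with
  | none => blocks          -- max([]) raises in Python; excluded by Pre_part1
  | some high =>
    match PySem.List.index? blocks high with
    | none => blocks        -- unreachable: the max is a member
    | some idxN =>
      let redis_idx : Int := (idxN : Int)
      let cur_num := PySem.List.pyGetD blocks redis_idx 0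
      let redis_num := if cur_num ≤ length - 1 then 1 else PySem.Int.floordiv cur_num (length - 1)
      let redis_total := if 1 < redis_num then redis_num * (length - 1) else cur_num
      let blocks1 := PySem.List.pySetD blocks redis_idx (cur_num - redis_total)
      (PySem.List.enumerate (PySem.List.pyRange 0 redis_total redis_num) 1).foldl
        (fun bs p =>
          PySem.List.pySetD bs (PySem.Int.mod (redis_idx + p.1) length)
            (PySem.List.pyGetD bs (PySem.Int.mod (redis_idx + p.1) length) 0 + redis_num))
        blocks1

def part1LoopA (length : Int) : Nat → List Int → List (List Int) → Int → Int × Int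
  | 0, _, _, _ => (0, 0)    -- fuel exhausted (provably never, see pv_loopA)
  | fuel + 1, blocks, seen, count =>
    let blocks2 := pvRedis length blocks
    let count2 := count + 1
    if seen.any (fun x => blocks2 == x) then (count2, get_cycle_size seen blocks2)
    else part1LoopA length fuel blocks2 (seen ++ [blocks2]) count2

def part1 (blocks : List Int) : Int × Int :=
  part1LoopA (PySem.List.len blocks) (pvFuel blocks) blocks [blocks] 0

-- ===== PORT B =====
-- B's step helper: one redistribution, as a pure function
def pvStepB (length : Int) (state : List Int) : List Int :=
  match PySem.List.max? state (fun x => x) with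
  | none => state           -- max([]) raises in Python; excluded by Pre_part1
  | some high =>
    match PySem.List.index? state high with
    | none => state         -- unreachable: the max is a member
    | some iN =>
      let i : Int := (iN : Int)
      let num := if high ≤ length - 1 then 1 else PySem.Int.floordiv high (length - 1)
      let total := if 1 < num then num * (length - 1) else high
      let state1 := PySem.List.pySetD state i (high - total)
      let chunks : Int := PySem.List.len (PySem.List.pyRange 0 total num)
      (PySem.List.pyRange 1 (chunks + 1) 1).foldl
        (fun st off =>
          PySem.List.pySetD st (PySem.Int.mod (i + off) length)
            (PySem.List.pyGetD st (PySem.Int.mod (i + off) length) 0 + num)) state1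

-- phase 1: while tortoise != hare: tortoise = step(tortoise); hare = step(step(hare))
def pvFloyd1 (length : Int) : Nat → List Int → List Int → List Int
  | 0, _, hare => hare
  | fuel + 1, tort, hare =>
    if tort == hare then hare
    else pvFloyd1 length fuel (pvStepB length tort) (pvStepB length (pvStepB length hare))

-- phase 2: while tortoise != hare: advance both; count mu
def pvFloyd2 (length : Int) : Nat → List Int → List Int → Int → List Int × Int
  | 0, tort, _, mu => (tort, mu)
  | fuel + 1, tort, hare, mu =>
    if tort == hare then (tort, mu)
    else pvFloyd2 length fuel (pvStepB length tort) (pvStepB length hare) (mu + 1)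

-- phase 3: while tortoise != hare: advance hare; count lam
def pvFloyd3 (length : Int) : Nat → List Int → List Int → Int → Int
  | 0, _, _, lam => lam
  | fuel + 1, tort, hare, lam =>
    if tort == hare then lam
    else pvFloyd3 length fuel tort (pvStepB length hare) (lam + 1)

def part1_alt (blocks : List Int) : Int × Int :=
  let length := PySem.List.len blocks
  let fuel := pvFuel blocks
  let hare1 := pvFloyd1 length fuel (pvStepB length blocks) (pvStepB length (pvStepB length blocks))
  let p2 := pvFloyd2 length fuel blocks hare1 0
  let lam := pvFloyd3 length fuel p2.1 (pvStepB length p2.1) 1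
  (p2.2 + lam, lam)

-- ===== PRECONDITION & SPEC =====
-- Pre_ excludes exactly the inputs where Python A raises: the empty list (max([]) is a
-- ValueError) and a singleton with a positive entry (cur_num // (length - 1) divides by
-- zero).  B raises on exactly the same inputs.
def Pre_part1 (blocks : List Int) : Prop :=
  blocks ≠ [] ∧ (blocks.length = 1 → ∀ x ∈ blocks, x ≤ 0)
instance (blocks : List Int) : Decidable (Pre_part1 blocks) := by unfold Pre_part1; infer_instance

def pvWitness_part1 : List Int := [0, 2, 7, 0]

def Spec_part1 (blocks : List Int) (out : Int × Int) : Prop := out = part1_alt blocks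
instance (blocks : List Int) (out : Int × Int) : Decidable (Spec_part1 blocks out) := by unfold Spec_part1; infer_instance

-- ===== CLAIM (what is proved, stated in full; the proofs are below) =====
def Claim_equal_part1 : Prop := ∀ (blocks : List Int), Dom_part1 blocks → Pre_part1 blocks → Spec_part1 blocks (part1 blocks)

-- ===== LEMMAS AND PROOFS =====

-- A's inline redistribution statements compute the same next state as B's step helper
lemma pv_step_eq (L : Int) (s : List Int) : pvRedis L s = pvStepB L s := by
  unfold pvRedis pvStepB
  cases hmax : PySem.List.max? s (fun x => x) with
  | none => rfl
  | some high =>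
    cases hidx : PySem.List.index? s high with
    | none => simp only [hidx]
    | some iN =>
      simp only [hidx]
      obtain ⟨hlt, hval, -⟩ := PySem.List.getElem_of_index?_eq_some hidx
      have hcur : PySem.List.pyGetD s ((iN : Nat) : Int) 0 = high := by
        rw [PySem.List.pyGetD_eq_getElem _ _ (by positivity) (by exact_mod_cast hlt)]
        simpa using hval
      simp only [hcur]
      set num := if high ≤ L - 1 then 1 else PySem.Int.floordiv high (L - 1) with hnum
      set total := if 1 < num then num * (L - 1) else high with htotal
      set r := PySem.List.pyRange 0 total num with hrange
      set init := PySem.List.pySetD s ((iN : Nat) : Int) (high - total) with hinit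
      rw [show (PySem.List.enumerate r 1).foldl
            (fun bs p =>
              PySem.List.pySetD bs (PySem.Int.mod (((iN : Nat) : Int) + p.1) L)
                (PySem.List.pyGetD bs (PySem.Int.mod (((iN : Nat) : Int) + p.1) L) 0 + num)) init
          = ((PySem.List.enumerate r 1).map (fun p => p.1)).foldl
            (fun bs off =>
              PySem.List.pySetD bs (PySem.Int.mod (((iN : Nat) : Int) + off) L)
                (PySem.List.pyGetD bs (PySem.Int.mod (((iN : Nat) : Int) + off) L) 0 + num)) init from
        (List.foldl_map (f := fun p : Int × Int => p.1)
          (g := fun bs off =>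
            PySem.List.pySetD bs (PySem.Int.mod (((iN : Nat) : Int) + off) L)
              (PySem.List.pyGetD bs (PySem.Int.mod (((iN : Nat) : Int) + off) L) 0 + num))
          (l := PySem.List.enumerate r 1) (init := init)).symm]
      rw [PySem.List.map_fst_enumerate]
      rw [show PySem.List.len r + 1 = 1 + (r.length : Int) by
        rw [PySem.List.len_eq]; ring]

-- ## generic facts about eventually periodic orbits of f under iteration

-- a least element of an inhabited set of naturals (classically, no decidability needed)
lemma pv_nat_exists_min {P : ℕ → Prop} : ∀ n, P n → ∃ m, P m ∧ ∀ k, k < m → ¬ P k := by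
  intro n
  induction n using Nat.strong_induction_on with
  | _ n ih =>
    intro hn
    by_cases h : ∃ k, k < n ∧ P k
    · obtain ⟨k, hk, hPk⟩ := h; exact ih k hk hPk
    · exact ⟨n, hn, fun k hk hPk => h ⟨k, hk, hPk⟩⟩

-- propagate a coincidence f^[a+d] = f^[a] forward and along multiples of d
lemma pv_orbit_prop {α : Type} (f : α → α) (x0 : α) (a d : ℕ)
    (h : f^[a + d] x0 = f^[a] x0) :
    ∀ k q, a ≤ k → f^[k + q * d] x0 = f^[k] x0 := by
  have hone : ∀ e, f^[(a + e) + d] x0 = f^[a + e] x0 := by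
    intro e
    induction e with
    | zero => simpa using h
    | succ e ih =>
      have h1 : (a + (e + 1)) + d = ((a + e) + d) + 1 := by omega
      rw [h1, Function.iterate_succ_apply', ih,
        show a + (e + 1) = (a + e) + 1 by omega, Function.iterate_succ_apply']
  intro k q hk
  obtain ⟨e, rfl⟩ := Nat.exists_eq_add_of_le hk
  induction q with
  | zero => simp
  | succ q ih =>
    have h1 : (a + e) + (q + 1) * d = ((a + e) + q * d) + d := by ring
    have h2 : (a + e) + q * d = a + (e + q * d) := by ring
    rw [h1, h2, hone (e + q * d), ← h2, ih]

-- global minimality of the preperiod from its boundedly-checked minimality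
lemma pv_mu_global {α : Type} (f : α → α) (x0 : α) (μ lam N : ℕ)
    (hper : f^[μ + lam] x0 = f^[μ] x0) (hl : 0 < lam)
    (hmuN : ∀ m n, m < n → n ≤ N → f^[m] x0 = f^[n] x0 → μ ≤ m)
    (hmlN : μ + lam ≤ N) :
    ∀ m n, m < n → f^[m] x0 = f^[n] x0 → μ ≤ m := by
  intro m n hmn heq
  by_contra hm
  push_neg at hm
  have he1 : 1 ≤ n - m := by omega
  have hrep : f^[m + (n - m)] x0 = f^[m] x0 := by
    rw [show m + (n - m) = n by omega]; exact heq.symm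
  have h1 : f^[m + μ * (n - m)] x0 = f^[m] x0 := pv_orbit_prop f x0 m (n - m) hrep m μ le_rfl
  have htμ : μ ≤ m + μ * (n - m) := by
    have : μ ≤ μ * (n - m) := Nat.le_mul_of_pos_right μ (by omega)
    omega
  have hrl : (m + μ * (n - m) - μ) % lam < lam := Nat.mod_lt _ hl
  have h2 : f^[(μ + (m + μ * (n - m) - μ) % lam) + ((m + μ * (n - m) - μ) / lam) * lam] x0
      = f^[μ + (m + μ * (n - m) - μ) % lam] x0 :=
    pv_orbit_prop f x0 μ lam hper _ _ (by omega)
  have h3 : (μ + (m + μ * (n - m) - μ) % lam) + ((m + μ * (n - m) - μ) / lam) * lam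
      = m + μ * (n - m) := by
    have hmod := Nat.div_add_mod (m + μ * (n - m) - μ) lam
    have hc : ((m + μ * (n - m) - μ) / lam) * lam = lam * ((m + μ * (n - m) - μ) / lam) :=
      Nat.mul_comm _ _
    omega
  have h4 : f^[m] x0 = f^[μ + (m + μ * (n - m) - μ) % lam] x0 := by rw [← h1, ← h2, h3]
  have := hmuN m (μ + (m + μ * (n - m) - μ) % lam) (by omega) (by omega) h4
  omega

-- any coincidence at or after the preperiod is along a multiple of the period
lemma pv_lam_dvd {α : Type} (f : α → α) (x0 : α) (μ lam : ℕ)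
    (hper : f^[μ + lam] x0 = f^[μ] x0) (hl : 0 < lam)
    (hlmin : ∀ p, 0 < p → f^[μ + p] x0 = f^[μ] x0 → lam ≤ p) :
    ∀ m n, μ ≤ m → m < n → f^[m] x0 = f^[n] x0 → lam ∣ (n - m) := by
  intro m n hμm hmn heq
  have he1 : 1 ≤ n - m := by omega
  have hrep : f^[m + (n - m)] x0 = f^[m] x0 := by
    rw [show m + (n - m) = n by omega]; exact heq.symm
  have hum : m ≤ μ + m * lam := by
    have : m ≤ m * lam := Nat.le_mul_of_pos_right m (by omega)
    omega
  have h1 : f^[μ + m * lam] x0 = f^[μ] x0 := pv_orbit_prop f x0 μ lam hper μ m le_rfl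
  have h2 : f^[(μ + m * lam) + (n - m)] x0 = f^[μ + m * lam] x0 := by
    have := pv_orbit_prop f x0 m (n - m) hrep (μ + m * lam) 1 hum
    simpa using this
  have hrl : (n - m) % lam < lam := Nat.mod_lt _ hl
  have h3 : f^[(μ + (n - m) % lam) + (m + (n - m) / lam) * lam] x0
      = f^[μ + (n - m) % lam] x0 :=
    pv_orbit_prop f x0 μ lam hper _ _ (by omega)
  have h4 : (μ + (n - m) % lam) + (m + (n - m) / lam) * lam = (μ + m * lam) + (n - m) := by
    have hmod := Nat.div_add_mod (n - m) lam
    have hc : (m + (n - m) / lam) * lam = m * lam + lam * ((n - m) / lam) := by ring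
    omega
  have h5 : f^[μ + (n - m) % lam] x0 = f^[μ] x0 := by rw [← h3, h4, h2, h1]
  rcases Nat.eq_zero_or_pos ((n - m) % lam) with h0 | hpos
  · exact Nat.dvd_of_mod_eq_zero h0
  · have := hlmin _ hpos h5
    omega

lemma pv_char_fwd {α : Type} (f : α → α) (x0 : α) (μ lam : ℕ)
    (hper : f^[μ + lam] x0 = f^[μ] x0) (m d : ℕ) (hm : μ ≤ m) (hd : lam ∣ d) :
    f^[m + d] x0 = f^[m] x0 := by
  obtain ⟨q, rfl⟩ := hd
  rw [Nat.mul_comm]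
  exact pv_orbit_prop f x0 μ lam hper m q hm

-- remainder picked out by q (used to compute Python range lengths)
lemma pv_ediv_eq {L a q : Int} (hL : 0 < L) (h1 : 0 ≤ a - L * q) (h2 : a - L * q < L) :
    a / L = q := by
  exact ((Int.ediv_emod_unique (a := a) (r := a - L * q) (q := q) hL).mpr ⟨by ring, h1, h2⟩).1

-- ## the bounded-state invariant giving the pigeonhole collision

def pvSumAbs (s : List Int) : Int := (s.map (fun v => |v|)).sum

def pvGood (L0 : ℕ) (A : Int) (s : List Int) : Prop :=
  s.length = L0 ∧ pvSumAbs s ≤ A ∧ (L0 = 1 → ∀ v ∈ s, v ≤ 0)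

lemma pvSumAbs_nonneg (s : List Int) : 0 ≤ pvSumAbs s := by
  apply List.sum_nonneg
  intro x hx
  obtain ⟨v, -, rfl⟩ := List.mem_map.mp hx
  exact abs_nonneg v

lemma pv_abs_le_sumAbs (s : List Int) {v : Int} (hv : v ∈ s) : |v| ≤ pvSumAbs s := by
  apply List.single_le_sum (fun x hx => ?_) _ (List.mem_map_of_mem hv)
  obtain ⟨w, -, rfl⟩ := List.mem_map.mp hx
  exact abs_nonneg w

lemma pvSumAbs_set (s : List Int) (j : ℕ) (hj : j < s.length) (v : Int) :
    pvSumAbs (s.set j v) + |s[j]| = pvSumAbs s + |v| := by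
  induction s generalizing j with
  | nil => simp at hj
  | cons a t ih =>
    cases j with
    | zero => simp [pvSumAbs]; ring
    | succ j =>
      have hj' : j < t.length := by simpa using hj
      have := ih j hj'
      simp only [List.set_cons_succ, pvSumAbs, List.map_cons, List.sum_cons,
        List.getElem_cons_succ] at *
      omega

-- one pass of the redistribution fold: length is preserved, total magnitude grows
-- by at most |num| per visited offset
lemma pv_fold_len_sum (L num i : Int) (hL : 0 < L) :
    ∀ (offs : List Int) (st : List Int), (st.length : Int) = L →
      (offs.foldl (fun st off =>
          PySem.List.pySetD st (PySem.Int.mod (i + off) L)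
            (PySem.List.pyGetD st (PySem.Int.mod (i + off) L) 0 + num)) st).length = st.length ∧
      pvSumAbs (offs.foldl (fun st off =>
          PySem.List.pySetD st (PySem.Int.mod (i + off) L)
            (PySem.List.pyGetD st (PySem.Int.mod (i + off) L) 0 + num)) st)
        ≤ pvSumAbs st + (offs.length : Int) * |num| := by
  intro offs
  induction offs with
  | nil => intro st h; exact ⟨rfl, by simp⟩
  | cons off rest ih =>
    intro st hst
    have h0 : 0 ≤ PySem.Int.mod (i + off) L := PySem.Int.mod_nonneg _ hL
    have hmlt : PySem.Int.mod (i + off) L < L := PySem.Int.mod_lt _ hL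
    have hj : (PySem.Int.mod (i + off) L).toNat < st.length := by omega
    simp only [List.foldl_cons]
    rw [PySem.List.pySetD_of_nonneg _ _ h0, PySem.List.pyGetD_eq_getElem _ _ h0 (by omega)]
    set j := (PySem.Int.mod (i + off) L).toNat with hjdef
    have hlen : (st.set j (st[j] + num)).length = st.length := by simp
    obtain ⟨ih1, ih2⟩ := ih (st.set j (st[j] + num)) (by rw [hlen]; exact hst)
    refine ⟨by rw [ih1, hlen], ?_⟩
    have hset := pvSumAbs_set st j hj (st[j] + num)
    have habs : |st[j] + num| ≤ |st[j]| + |num| := abs_add_le _ _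
    calc pvSumAbs _ ≤ pvSumAbs (st.set j (st[j] + num)) + (rest.length : Int) * |num| := ih2
      _ ≤ pvSumAbs st + |num| + (rest.length : Int) * |num| := by omega
      _ = pvSumAbs st + (((off :: rest).length : Int)) * |num| := by
          simp only [List.length_cons]; push_cast; ring

lemma pvGood_step (L0 : ℕ) (A : Int) (h0 : 0 < L0) (s : List Int)
    (hs : pvGood L0 A s) : pvGood L0 A (pvStepB (L0 : Int) s) := by
  obtain ⟨hlen, hsum, hneg⟩ := hs
  have hne : s ≠ [] := by
    intro h; rw [h] at hlen; simp at hlen; omega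
  have hL : (0 : Int) < (L0 : Int) := by exact_mod_cast h0
  unfold pvStepB
  cases hmax : PySem.List.max? s (fun x => x) with
  | none => exact absurd ((PySem.List.max?_eq_none_iff _ _).mp hmax) hne
  | some high =>
    have hmem : high ∈ s := PySem.List.max?_mem hmax
    cases hidx : PySem.List.index? s high with
    | none => exact ((PySem.List.index?_eq_none_iff _ _).mp hidx hmem).elim
    | some iN =>
      simp only [hidx]
      obtain ⟨hlt, hval, -⟩ := PySem.List.getElem_of_index?_eq_some hidx
      set num := if high ≤ (L0 : Int) - 1 then 1 else PySem.Int.floordiv high ((L0 : Int) - 1) with hnum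
      set total := if 1 < num then num * ((L0 : Int) - 1) else high with htotal
      have hset1 : PySem.List.pySetD s ((iN : Nat) : Int) (high - total) = s.set iN (high - total) := by
        simp
      set T := (PySem.List.pyRange 0 total num).length with hT
      have hchunks : PySem.List.len (PySem.List.pyRange 0 total num) + 1 = ((T : Int) + 1) := by
        rw [PySem.List.len_eq]
      -- arithmetic core: the per-case bound
      have hkey : (T : Int) * |num| + |high - total| ≤ |high| := by
        by_cases hc : high ≤ (L0 : Int) - 1
        · have hnum1 : num = 1 := by rw [hnum, if_pos hc]
          have htot : total = high := by rw [htotal, hnum1]; norm_num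
          have hTval : T = high.toNat := by
            rw [hT, htot, hnum1, PySem.List.length_pyRange_one]
            omega
          rw [hnum1, htot, hTval]
          simp only [abs_one, mul_one, sub_self, abs_zero, add_zero, Int.abs_eq_natAbs]
          omega
        · push_neg at hc
          have hL2 : 1 ≤ (L0 : Int) - 1 := by
            rcases Nat.lt_or_ge 1 L0 with h | h
            · omega
            · -- L0 = 1: all entries are ≤ 0 but the max is > 0, impossible
              have h1 : L0 = 1 := by omega
              have := hneg h1 high hmem
              omega
          have hnum' : num = PySem.Int.floordiv high ((L0 : Int) - 1) := by
            rw [hnum, if_neg (by omega)]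
          have hnumpos : 1 ≤ num := by
            rw [hnum', PySem.Int.le_floordiv_iff_mul_le (by omega)]
            omega
          by_cases h2 : 1 < num
          · have htot : total = num * ((L0 : Int) - 1) := by rw [htotal, if_pos h2]
            have hfm := PySem.Int.floordiv_mul_add_mod high ((L0 : Int) - 1)
            have hmn := PySem.Int.mod_nonneg high (b := (L0 : Int) - 1) (by omega)
            have hml := PySem.Int.mod_lt high (b := (L0 : Int) - 1) (by omega)
            rw [← hnum'] at hfm
            have htoth : total ≤ high := by
              rw [htot]
              omega
            have htpos : 0 < total := by
              have := mul_pos (show (0:Int) < num by omega) (show (0:Int) < (L0 : Int) - 1 by omega)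
              rw [htot]
              omega
            have hTval : (T : Int) = (L0 : Int) - 1 := by
              rw [hT, PySem.List.pyRange_of_pos _ _ (show (0:Int) < num by omega),
                List.length_map, List.length_range, if_pos (show (0:Int) < total by omega)]
              have he : (total - 0 + num - 1) / num = (L0 : Int) - 1 := by
                apply pv_ediv_eq (show (0:Int) < num by omega)
                · rw [htot]; ring_nf; omega
                · rw [htot]; ring_nf; omega
              rw [he]
              omega
            have habsn : |num| = num := abs_of_pos (by omega)
            have habsh : |high - total| = high - total := abs_of_nonneg (by omega)
            have habshi : |high| = high := abs_of_pos (by omega)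
            rw [hTval, habsn, habsh, habshi, htot]
            ring_nf
            omega
          · have hnum1 : num = 1 := by omega
            have htot : total = high := by rw [htotal, hnum1]; norm_num
            have hTval : T = high.toNat := by
              rw [hT, htot, hnum1, PySem.List.length_pyRange_one]
              omega
            rw [hnum1, htot, hTval]
            simp only [abs_one, mul_one, sub_self, abs_zero, add_zero, Int.abs_eq_natAbs]
            omega
      -- length and sum via the fold lemma
      have hsetlen : ((s.set iN (high - total)).length : Int) = (L0 : Int) := by
        simp [hlen]
      obtain ⟨hflen, hfsum⟩ := pv_fold_len_sum (L0 : Int) num ((iN : Nat) : Int) hL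
        (PySem.List.pyRange 1 ((T : Int) + 1) 1) (s.set iN (high - total)) hsetlen
      have hrlen : (PySem.List.pyRange 1 ((T : Int) + 1) 1).length = T := by
        rw [PySem.List.length_pyRange_one]
        omega
      have hsset := pvSumAbs_set s iN hlt (high - total)
      rw [hval] at hsset
      refine ⟨?_, ?_, ?_⟩
      · rw [hchunks, hset1, hflen]
        simpa using hlen
      · rw [hchunks, hset1]
        have h1 : pvSumAbs (s.set iN (high - total)) + (T : Int) * |num| ≤ pvSumAbs s := by
          omega
        calc pvSumAbs _ ≤ pvSumAbs (s.set iN (high - total)) + ((PySem.List.pyRange 1 ((T : Int) + 1) 1).length : Int) * |num| := hfsum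
          _ = pvSumAbs (s.set iN (high - total)) + (T : Int) * |num| := by rw [hrlen]
          _ ≤ pvSumAbs s := h1
          _ ≤ A := hsum
      · intro h1 v hv
        -- length 1: the max is ≤ 0, one chunk of size 0 is moved, the fold is empty
        have hh0 : high ≤ 0 := hneg h1 high hmem
        have hc : high ≤ (L0 : Int) - 1 := by
          rw [h1]; push_cast; omega
        have hnum1 : num = 1 := by rw [hnum, if_pos hc]
        have htot : total = high := by rw [htotal, hnum1]; norm_num
        have hT0 : T = 0 := by
          rw [hT, htot, hnum1, PySem.List.length_pyRange_one]
          omega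
        rw [hchunks, hT0, hset1] at hv
        rw [show ((0 : Nat) : Int) + 1 = 1 by norm_num, PySem.List.pyRange_one_eq_nil le_rfl] at hv
        simp only [List.foldl_nil] at hv
        rcases List.mem_or_eq_of_mem_set hv with h | h
        · exact hneg h1 v h
        · rw [h, htot]; omega

-- ## base-K encoding of bounded states, for the pigeonhole argument

def pvEnc (K : ℕ) (A : Int) : List Int → ℕ
  | [] => 0
  | v :: t => (v + A).toNat + K * pvEnc K A t

lemma pvEnc_lt (K : ℕ) (A : Int) :
    ∀ s : List Int, (∀ v ∈ s, (v + A).toNat < K) → pvEnc K A s < K ^ s.length := by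
  intro s
  induction s with
  | nil => intro _; simp [pvEnc]
  | cons v t ih =>
    intro h
    have hd : (v + A).toNat < K := h v (by simp)
    have he : pvEnc K A t < K ^ t.length := ih (fun w hw => h w (by simp [hw]))
    calc pvEnc K A (v :: t) = (v + A).toNat + K * pvEnc K A t := rfl
      _ < K * pvEnc K A t + K := by omega
      _ = K * (pvEnc K A t + 1) := by ring
      _ ≤ K * K ^ t.length := Nat.mul_le_mul_left K (by omega)
      _ = K ^ (v :: t).length := by rw [List.length_cons, pow_succ, Nat.mul_comm]

lemma pvEnc_inj (K : ℕ) (A : Int) :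
    ∀ s t : List Int, s.length = t.length →
      (∀ v ∈ s, (v + A).toNat < K ∧ 0 ≤ v + A) →
      (∀ v ∈ t, (v + A).toNat < K ∧ 0 ≤ v + A) →
      pvEnc K A s = pvEnc K A t → s = t := by
  intro s
  induction s with
  | nil => intro t hlen _ _ _; exact (List.eq_nil_of_length_eq_zero hlen.symm).symm ▸ rfl
  | cons v s ih =>
    intro t hlen hs ht heq
    cases t with
    | nil => simp at hlen
    | cons w t =>
      obtain ⟨hv, hv0⟩ := hs v (by simp)
      obtain ⟨hw, hw0⟩ := ht w (by simp)
      have hK : 0 < K := by omega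
      have hmod : ((v + A).toNat + K * pvEnc K A s) % K = ((w + A).toNat + K * pvEnc K A t) % K := by
        simpa [pvEnc] using congrArg (· % K) heq
      rw [Nat.add_mul_mod_self_left, Nat.add_mul_mod_self_left,
        Nat.mod_eq_of_lt hv, Nat.mod_eq_of_lt hw] at hmod
      have hvw : v = w := by omega
      subst hvw
      have htail : pvEnc K A s = pvEnc K A t := by
        have : (v + A).toNat + K * pvEnc K A s = (v + A).toNat + K * pvEnc K A t := heq
        have h2 : K * pvEnc K A s = K * pvEnc K A t := by omega
        exact Nat.eq_of_mul_eq_mul_left hK h2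
      have := ih t (by simpa using hlen) (fun x hx => hs x (by simp [hx]))
        (fun x hx => ht x (by simp [hx])) htail
      rw [this]

-- ## loop A returns (mu+lam, lam)

lemma pvCycleGo_spec (target : List Int) : ∀ (l : List (List Int)) (idx : Int) (k : ℕ),
    PySem.List.index? l target = some k → pvCycleGo target l idx = idx + (k : Int) := by
  intro l
  induction l with
  | nil => intro idx k h; simp [PySem.List.index?] at h
  | cons c rest ih =>
    intro idx k h
    by_cases hc : c = target
    · subst hc
      rw [PySem.List.index?_cons_self] at h
      cases h
      simp [pvCycleGo]
    · rw [PySem.List.index?_cons_of_ne rest hc] at h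
      cases hk : PySem.List.index? rest target with
      | none => rw [hk] at h; simp at h
      | some k' =>
        rw [hk] at h; simp at h
        rw [pvCycleGo]
        rw [if_neg (by simpa using hc), ih _ _ hk]
        omega

lemma pv_index?_reverse {l : List (List Int)} {t : List Int} {j : ℕ}
    (hnd : l.Nodup) (hj : PySem.List.index? l t = some j) :
    PySem.List.index? l.reverse t = some (l.length - 1 - j) := by
  obtain ⟨pre, suf, hl, hlen, hpre⟩ := (PySem.List.index?_eq_some_iff l t j).mp hj
  subst hl
  have hnsuf : t ∉ suf := by
    have h2 := hnd.of_append_right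
    rw [List.nodup_cons] at h2
    exact h2.1
  apply (PySem.List.index?_eq_some_iff _ t _).mpr
  refine ⟨suf.reverse, pre.reverse, by simp, by simp; omega, by simpa using hnsuf⟩

-- first occurrence of t in [X 0, ..., X (c-1)] is at position j
lemma pv_index?_map_range (X : ℕ → List Int) (t : List Int) (c j : ℕ) (hj : j < c)
    (ht : X j = t) (hfirst : ∀ i, i < j → X i ≠ t) :
    PySem.List.index? ((List.range c).map X) t = some j := by
  apply (PySem.List.index?_eq_some_iff _ t j).mpr
  have hlen : ((List.range c).map X).length = c := by simp
  have hjl : j < ((List.range c).map X).length := by omega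
  refine ⟨((List.range c).map X).take j, ((List.range c).map X).drop (j + 1), ?_, ?_, ?_⟩
  · rw [show t = ((List.range c).map X)[j] by rw [List.getElem_map, List.getElem_range]; exact ht.symm]
    rw [List.getElem_cons_drop, List.take_append_drop]
  · simp; omega
  · intro hmem
    rw [← List.map_take, List.take_range, Nat.min_eq_left (by omega)] at hmem
    obtain ⟨i, hi, hXi⟩ := List.mem_map.mp hmem
    rw [List.mem_range] at hi
    exact hfirst i hi hXi

lemma pv_loopA (L : Int) (x0 : List Int) (μ lam : ℕ) (hl : 0 < lam)
    (hper : (pvStepB L)^[μ + lam] x0 = (pvStepB L)^[μ] x0)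
    (hdist : ∀ i j, i < j → j < μ + lam → (pvStepB L)^[i] x0 ≠ (pvStepB L)^[j] x0)
    (huniq : ∀ i, i < μ + lam → (pvStepB L)^[i] x0 = (pvStepB L)^[μ + lam] x0 → i = μ) :
    ∀ fuel k, k < μ + lam → μ + lam ≤ k + fuel →
      part1LoopA L fuel ((pvStepB L)^[k] x0) ((List.range (k + 1)).map (fun n => (pvStepB L)^[n] x0)) (k : Int)
        = (((μ + lam : ℕ) : Int), ((lam : ℕ) : Int)) := by
  intro fuel
  induction fuel with
  | zero => intro k hk hfuel; omega
  | succ fuel ih =>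
    intro k hk hfuel
    rw [part1LoopA]
    have hstep : pvRedis L ((pvStepB L)^[k] x0) = (pvStepB L)^[k + 1] x0 := by
      rw [pv_step_eq]
      exact (Function.iterate_succ_apply' _ _ _).symm
    simp only [hstep]
    have hany : (((List.range (k + 1)).map (fun n => (pvStepB L)^[n] x0)).any
        (fun x => (pvStepB L)^[k + 1] x0 == x) = true)
        ↔ ∃ i, i < k + 1 ∧ (pvStepB L)^[k + 1] x0 = (pvStepB L)^[i] x0 := by
      simp only [List.any_eq_true, List.mem_map, List.mem_range, beq_iff_eq]
      constructor
      · rintro ⟨x, ⟨i, hi, rfl⟩, hx⟩; exact ⟨i, hi, hx⟩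
      · rintro ⟨i, hi, hx⟩; exact ⟨_, ⟨i, hi, rfl⟩, hx⟩
    rcases Nat.lt_or_ge (k + 1) (μ + lam) with hlt | hge
    · -- no repetition yet
      rw [if_neg (by
        intro h
        obtain ⟨i, hi, hx⟩ := hany.mp h
        exact hdist i (k + 1) hi hlt hx.symm)]
      have hseen : (List.range (k + 2)).map (fun n => (pvStepB L)^[n] x0)
          = ((List.range (k + 1)).map (fun n => (pvStepB L)^[n] x0)) ++ [(pvStepB L)^[k + 1] x0] := by
        rw [List.range_succ, List.map_append]
        rfl
      rw [← hseen, show (k : Int) + 1 = ((k + 1 : ℕ) : Int) by push_cast; ring]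
      exact ih (k + 1) hlt (by omega)
    · -- k + 1 = μ + lam: the state repeats, A returns
      have hc : k + 1 = μ + lam := by omega
      rw [if_pos (hany.mpr ⟨μ, by omega, by rw [hc]; exact hper⟩)]
      have hidx : PySem.List.index? ((List.range (k + 1)).map (fun n => (pvStepB L)^[n] x0))
          ((pvStepB L)^[k + 1] x0) = some μ := by
        apply pv_index?_map_range _ _ _ _ (by omega)
        · rw [hc]; exact hper.symm
        · intro i hi hXi
          have := huniq i (by omega) (by rw [← hc]; exact hXi)
          omega
      have hnodup : ((List.range (k + 1)).map (fun n => (pvStepB L)^[n] x0)).Nodup := by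
        apply List.Nodup.map_on _ (List.nodup_range)
        intro a ha b hb hab
        rw [List.mem_range] at ha hb
        by_contra hne
        rcases Nat.lt_or_ge a b with h | h
        · exact hdist a b h (by omega) hab
        · exact hdist b a (by omega) (by omega) hab.symm
      have hrev := pv_index?_reverse hnodup hidx
      rw [show get_cycle_size ((List.range (k + 1)).map (fun n => (pvStepB L)^[n] x0))
            ((pvStepB L)^[k + 1] x0)
          = pvCycleGo ((pvStepB L)^[k + 1] x0)
              ((List.range (k + 1)).map (fun n => (pvStepB L)^[n] x0)).reverse 1 from rfl]
      rw [pvCycleGo_spec _ _ _ _ hrev]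
      have hlenseen : ((List.range (k + 1)).map (fun n => (pvStepB L)^[n] x0)).length = k + 1 := by
        simp
      refine Prod.ext ?_ ?_
      · simp only
        omega
      · simp only [hlenseen]
        have : k + 1 - 1 - μ = lam - 1 := by omega
        rw [this]
        push_cast [Nat.cast_sub (by omega : 1 ≤ lam)]
        ring

-- ## the three Floyd loops

lemma pv_floyd1 (L : Int) (x0 : List Int) (ν : ℕ)
    (hmeet : (pvStepB L)^[ν] x0 = (pvStepB L)^[2 * ν] x0)
    (hmin : ∀ n, 0 < n → n < ν → (pvStepB L)^[n] x0 ≠ (pvStepB L)^[2 * n] x0) :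
    ∀ fuel n, 0 < n → n ≤ ν → ν ≤ n + fuel →
      pvFloyd1 L fuel ((pvStepB L)^[n] x0) ((pvStepB L)^[2 * n] x0) = (pvStepB L)^[2 * ν] x0 := by
  intro fuel
  induction fuel with
  | zero =>
    intro n hn hnν hνn
    have hnn : n = ν := by omega
    subst hnn
    rfl
  | succ fuel ih =>
    intro n hn hnν hνn
    rw [pvFloyd1]
    by_cases h : (pvStepB L)^[n] x0 = (pvStepB L)^[2 * n] x0
    · have hnn : n = ν := by
        by_contra hne
        exact hmin n hn (by omega) h
      rw [if_pos (beq_iff_eq.mpr h), hnn]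
    · have hltν : n < ν := by
        rcases Nat.lt_or_ge n ν with h1 | h1
        · exact h1
        · exact absurd (by rw [show n = ν by omega]; exact hmeet) h
      rw [if_neg (fun hc => h (beq_iff_eq.mp hc))]
      have e1 : pvStepB L ((pvStepB L)^[n] x0) = (pvStepB L)^[n + 1] x0 :=
        (Function.iterate_succ_apply' _ _ _).symm
      have e2 : pvStepB L (pvStepB L ((pvStepB L)^[2 * n] x0)) = (pvStepB L)^[2 * (n + 1)] x0 := by
        rw [show 2 * (n + 1) = (2 * n + 1) + 1 by ring, Function.iterate_succ_apply',
          Function.iterate_succ_apply']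
      rw [e1, e2]
      exact ih (n + 1) (by omega) (by omega) (by omega)

lemma pv_floyd2 (L : Int) (x0 : List Int) (ν μ : ℕ)
    (hook : ∀ m, μ ≤ m → (pvStepB L)^[m + 2 * ν] x0 = (pvStepB L)^[m] x0)
    (hmin : ∀ m, m < μ → (pvStepB L)^[m] x0 ≠ (pvStepB L)^[m + 2 * ν] x0) :
    ∀ fuel m, m ≤ μ → μ ≤ m + fuel →
      pvFloyd2 L fuel ((pvStepB L)^[m] x0) ((pvStepB L)^[m + 2 * ν] x0) (m : Int)
        = ((pvStepB L)^[μ] x0, ((μ : ℕ) : Int)) := by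
  intro fuel
  induction fuel with
  | zero =>
    intro m hm hμm
    have hmm : m = μ := by omega
    subst hmm
    rfl
  | succ fuel ih =>
    intro m hm hμm
    rw [pvFloyd2]
    by_cases h : (pvStepB L)^[m] x0 = (pvStepB L)^[m + 2 * ν] x0
    · have hmm : m = μ := by
        by_contra hne
        exact hmin m (by omega) h
      subst hmm
      rw [if_pos (beq_iff_eq.mpr h)]
    · have hmlt : m < μ := by
        rcases Nat.lt_or_ge m μ with h1 | h1
        · exact h1
        · exact absurd ((hook m h1).symm) h
      rw [if_neg (fun hc => h (beq_iff_eq.mp hc))]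
      have e1 : pvStepB L ((pvStepB L)^[m] x0) = (pvStepB L)^[m + 1] x0 :=
        (Function.iterate_succ_apply' _ _ _).symm
      have e2 : pvStepB L ((pvStepB L)^[m + 2 * ν] x0) = (pvStepB L)^[(m + 1) + 2 * ν] x0 := by
        rw [show (m + 1) + 2 * ν = (m + 2 * ν) + 1 by ring, Function.iterate_succ_apply']
      rw [e1, e2, show (m : Int) + 1 = ((m + 1 : ℕ) : Int) by push_cast; ring]
      exact ih (m + 1) (by omega) (by omega)

lemma pv_floyd3 (L : Int) (x0 : List Int) (μ lam : ℕ)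
    (hper : (pvStepB L)^[μ + lam] x0 = (pvStepB L)^[μ] x0) (hl : 0 < lam)
    (hmin : ∀ p, 0 < p → p < lam → (pvStepB L)^[μ + p] x0 ≠ (pvStepB L)^[μ] x0) :
    ∀ fuel p, 0 < p → p ≤ lam → lam ≤ p + fuel →
      pvFloyd3 L fuel ((pvStepB L)^[μ] x0) ((pvStepB L)^[μ + p] x0) (p : Int) = ((lam : ℕ) : Int) := by
  intro fuel
  induction fuel with
  | zero =>
    intro p hp hple hlp
    have : p = lam := by omega
    subst this
    rfl
  | succ fuel ih =>
    intro p hp hple hlp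
    rw [pvFloyd3]
    by_cases h : (pvStepB L)^[μ + p] x0 = (pvStepB L)^[μ] x0
    · have hpl : p = lam := by
        by_contra hne
        exact hmin p hp (by omega) h
      rw [if_pos (beq_iff_eq.mpr h.symm), hpl]
    · have hplt : p < lam := by
        rcases Nat.lt_or_ge p lam with h1 | h1
        · exact h1
        · exact absurd (by rw [show p = lam by omega]; exact hper) h
      rw [if_neg (fun hc => h (beq_iff_eq.mp hc).symm)]
      have e1 : pvStepB L ((pvStepB L)^[μ + p] x0) = (pvStepB L)^[μ + (p + 1)] x0 := by
        rw [show μ + (p + 1) = (μ + p) + 1 from rfl, Function.iterate_succ_apply']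
      rw [e1, show (p : Int) + 1 = ((p + 1 : ℕ) : Int) by push_cast; ring]
      exact ih (p + 1) (by omega) (by omega) (by omega)

lemma pvSumAbs_eq_natAbs (s : List Int) : pvSumAbs s = ((s.map Int.natAbs).sum : Int) := by
  induction s with
  | nil => rfl
  | cons v t ih =>
    simp only [pvSumAbs, List.map_cons, List.sum_cons] at *
    rw [ih, Int.abs_eq_natAbs]
    push_cast
    ring

-- ===== VERDICT (by name: the statement is the Claim_ definition above) =====
theorem part1_spec : Claim_equal_part1 := by
  intro blocks _ hpre
  unfold Spec_part1
  obtain ⟨hne, hone⟩ := hpre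
  have hL0 : 0 < blocks.length := List.length_pos_iff.mpr hne
  set L0 := blocks.length with hL0def
  set A := pvSumAbs blocks with hAdef
  set K := 2 * A.toNat + 1 with hKdef
  set N := K ^ L0 with hNdef
  set f := pvStepB ((L0 : ℕ) : Int) with hfdef
  have hsumnat : (blocks.map Int.natAbs).sum = A.toNat := by
    rw [hAdef, pvSumAbs_eq_natAbs]
    omega
  have hfuel : pvFuel blocks = N + 1 := by
    simp only [pvFuel]
    rw [hsumnat, ← hL0def, ← hKdef, ← hNdef]
  -- the invariant: every orbit state has length L0, magnitude sum ≤ A, nonpositive if L0 = 1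
  have hGood : ∀ n, pvGood L0 A (f^[n] blocks) := by
    intro n
    induction n with
    | zero => exact ⟨rfl, le_refl _, hone⟩
    | succ n ihg =>
      rw [Function.iterate_succ_apply']
      exact pvGood_step L0 A hL0 _ ihg
  have hAnn : 0 ≤ A := pvSumAbs_nonneg blocks
  have hdig : ∀ n, ∀ v ∈ f^[n] blocks, (v + A).toNat < K ∧ 0 ≤ v + A := by
    intro n v hv
    have h1 : |v| ≤ A := le_trans (pv_abs_le_sumAbs _ hv) (hGood n).2.1
    rw [abs_le] at h1
    constructor
    · omega
    · omega
  -- pigeonhole: two equal states among the first N+1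
  have hmaps : ∀ n ∈ Finset.range (N + 1), pvEnc K A (f^[n] blocks) ∈ Finset.range N := by
    intro n _
    rw [Finset.mem_range]
    have h1 := pvEnc_lt K A (f^[n] blocks) (fun v hv => (hdig n v hv).1)
    rw [(hGood n).1] at h1
    exact h1
  obtain ⟨a, ha, b, hb, hab, habeq⟩ :=
    Finset.exists_ne_map_eq_of_card_lt_of_maps_to (by simp) hmaps
  rw [Finset.mem_range, Nat.lt_succ_iff] at ha hb
  have hXab : f^[a] blocks = f^[b] blocks :=
    pvEnc_inj K A _ _ (by rw [(hGood a).1, (hGood b).1]) (hdig a) (hdig b) habeq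
  have hcoll : ∃ i j, i < j ∧ j ≤ N ∧ f^[i] blocks = f^[j] blocks := by
    rcases Nat.lt_or_ge a b with h | h
    · exact ⟨a, b, h, hb, hXab⟩
    · exact ⟨b, a, by omega, ha, hXab.symm⟩
  obtain ⟨i0, j0, hij, hj0N, hXij⟩ := hcoll
  -- the preperiod μ, with boundedly-checked minimality
  obtain ⟨μ, ⟨nμ, hnμN, hμnμ, hXμ⟩, hμmin0⟩ :=
    pv_nat_exists_min (P := fun m => ∃ n, n ≤ N ∧ m < n ∧ f^[m] blocks = f^[n] blocks)
      i0 ⟨j0, hj0N, hij, hXij⟩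
  -- the period lam, with (unbounded) minimality
  obtain ⟨lam, ⟨hlpos, hper⟩, hlmin0⟩ :=
    pv_nat_exists_min (P := fun p => 0 < p ∧ f^[μ + p] blocks = f^[μ] blocks)
      (nμ - μ) ⟨by omega, by rw [show μ + (nμ - μ) = nμ by omega]; exact hXμ.symm⟩
  have hlmin : ∀ p, 0 < p → f^[μ + p] blocks = f^[μ] blocks → lam ≤ p := by
    intro p hp hXp
    by_contra hlt
    exact hlmin0 p (by omega) ⟨hp, hXp⟩
  have hlamle : lam ≤ nμ - μ := by
    by_contra h
    exact hlmin0 (nμ - μ) (by omega)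
      ⟨by omega, by rw [show μ + (nμ - μ) = nμ by omega]; exact hXμ.symm⟩
  have hmlN : μ + lam ≤ N := by omega
  have hμminb : ∀ m n, m < n → n ≤ N → f^[m] blocks = f^[n] blocks → μ ≤ m := by
    intro m n h1 h2 h3
    by_contra h4
    exact hμmin0 m (by omega) ⟨n, h2, h1, h3⟩
  have hμg := pv_mu_global f blocks μ lam N hper hlpos hμminb hmlN
  have hdvd := pv_lam_dvd f blocks μ lam hper hlpos hlmin
  have hfwd := pv_char_fwd f blocks μ lam hper
  have hdist : ∀ i j, i < j → j < μ + lam → f^[i] blocks ≠ f^[j] blocks := by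
    intro i j h1 h2 heq
    have h3 := hμg i j h1 heq
    have h4 := Nat.le_of_dvd (by omega) (hdvd i j h3 h1 heq)
    omega
  have huniq : ∀ i, i < μ + lam → f^[i] blocks = f^[μ + lam] blocks → i = μ := by
    intro i h1 heq
    have h3 := hμg i (μ + lam) (by omega) heq
    have h4 := Nat.le_of_dvd (by omega) (hdvd i (μ + lam) h3 (by omega) heq)
    omega
  -- side A: the seen-list loop returns (μ + lam, lam)
  have hlenint : PySem.List.len blocks = ((L0 : ℕ) : Int) := by
    rw [PySem.List.len_eq]
  have hA1 : part1 blocks = (((μ + lam : ℕ) : Int), ((lam : ℕ) : Int)) := by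
    rw [part1, hlenint, hfuel]
    have h0 := pv_loopA ((L0 : ℕ) : Int) blocks μ lam hlpos hper hdist huniq
      (N + 1) 0 (by omega) (by omega)
    simpa using h0
  -- the first Floyd meeting point ν
  have hν0 : 0 < lam * (μ / lam + 1) ∧
      f^[lam * (μ / lam + 1)] blocks = f^[2 * (lam * (μ / lam + 1))] blocks := by
    have hμle : μ ≤ lam * (μ / lam + 1) := by
      have h1 := Nat.div_add_mod μ lam
      have h2 : μ % lam < lam := Nat.mod_lt _ hlpos
      have h3 : lam * (μ / lam + 1) = lam * (μ / lam) + lam := by ring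
      omega
    refine ⟨by positivity, ?_⟩
    have h4 := hfwd (lam * (μ / lam + 1)) (lam * (μ / lam + 1)) hμle ⟨μ / lam + 1, rfl⟩
    rw [show 2 * (lam * (μ / lam + 1)) = lam * (μ / lam + 1) + lam * (μ / lam + 1) by ring]
    exact h4.symm
  obtain ⟨ν, ⟨hνpos, hνmeet⟩, hνmin0⟩ :=
    pv_nat_exists_min (P := fun n => 0 < n ∧ f^[n] blocks = f^[2 * n] blocks)
      (lam * (μ / lam + 1)) hν0
  have hνle : ν ≤ lam * (μ / lam + 1) := by
    by_contra h
    exact hνmin0 _ (by omega) hν0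
  have hν0le : lam * (μ / lam + 1) ≤ μ + lam := by
    have h1 : lam * (μ / lam) ≤ μ := by
      rw [Nat.mul_comm]
      exact Nat.div_mul_le_self μ lam
    have h3 : lam * (μ / lam + 1) = lam * (μ / lam) + lam := by ring
    omega
  have hνN : ν ≤ N := by omega
  have hνμ : μ ≤ ν := hμg ν (2 * ν) (by omega) hνmeet
  have hνdvd : lam ∣ ν := by
    have := hdvd ν (2 * ν) hνμ (by omega) hνmeet
    rwa [show 2 * ν - ν = ν by omega] at this
  have hνminne : ∀ n, 0 < n → n < ν → f^[n] blocks ≠ f^[2 * n] blocks :=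
    fun n h1 h2 heq => hνmin0 n h2 ⟨h1, heq⟩
  -- side B: the three Floyd phases
  have hB1 : pvFloyd1 ((L0 : ℕ) : Int) (N + 1) (f blocks) (f (f blocks)) = f^[2 * ν] blocks := by
    have h0 := pv_floyd1 ((L0 : ℕ) : Int) blocks ν hνmeet hνminne (N + 1) 1
      (by omega) (by omega) (by omega)
    have e1 : f^[1] blocks = f blocks := by simp
    have e2 : f^[2 * 1] blocks = f (f blocks) := by
      rw [show 2 * 1 = 1 + 1 from rfl, Function.iterate_succ_apply', e1]
    rw [e1, e2] at h0
    exact h0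
  have hook : ∀ m, μ ≤ m → f^[m + 2 * ν] blocks = f^[m] blocks :=
    fun m hm => hfwd m (2 * ν) hm (hνdvd.mul_left 2)
  have hmin2 : ∀ m, m < μ → f^[m] blocks ≠ f^[m + 2 * ν] blocks := by
    intro m hm heq
    have := hμg m (m + 2 * ν) (by omega) heq
    omega
  have hB2 : pvFloyd2 ((L0 : ℕ) : Int) (N + 1) blocks (f^[2 * ν] blocks) 0
      = (f^[μ] blocks, ((μ : ℕ) : Int)) := by
    have h0 := pv_floyd2 ((L0 : ℕ) : Int) blocks ν μ hook hmin2 (N + 1) 0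
      (by omega) (by omega)
    simpa using h0
  have hmin3 : ∀ p, 0 < p → p < lam → f^[μ + p] blocks ≠ f^[μ] blocks := by
    intro p h1 h2 heq
    have := hlmin p h1 heq
    omega
  have hB3 : pvFloyd3 ((L0 : ℕ) : Int) (N + 1) (f^[μ] blocks) (f (f^[μ] blocks)) 1
      = ((lam : ℕ) : Int) := by
    have h0 := pv_floyd3 ((L0 : ℕ) : Int) blocks μ lam hper hlpos hmin3 (N + 1) 1
      (by omega) (by omega) (by omega)
    have e1 : f^[μ + 1] blocks = f (f^[μ] blocks) := Function.iterate_succ_apply' _ _ _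
    rw [e1] at h0
    simpa using h0
  have hB : part1_alt blocks = (((μ : ℕ) : Int) + ((lam : ℕ) : Int), ((lam : ℕ) : Int)) := by
    simp only [part1_alt]
    rw [hlenint, hfuel, hB1, hB2, hB3]
  rw [hA1, hB]
  refine Prod.ext ?_ rfl
  push_cast
  ring
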